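-- pv_equiv track=rewrite | github.com/Thonygon/lesson-manager-app | helpers/language.py | pack_languages
-- ===== SOURCE A (Python) =====
-- from typing import List, Optional, Tuple
--
-- LANG_EN = "English"
--
-- LANG_ES = "Spanish"
--
-- LANG_BOTH = "English,Spanish"
--
-- def pack_languages(selected: List[str]) -> str:
--     s = [x for x in selected if x in (LANG_EN, LANG_ES)]
--     s = sorted(set(s), key=lambda z: 0 if z == LANG_EN else 1)
--     if len(s) == 2:
--         return LANG_BOTH
--     if len(s) == 1:
--         return s[0]
--     return LANG_ES
-- ===== SOURCE B (Python) =====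
-- LANG_EN = "English"
-- LANG_ES = "Spanish"
-- LANG_BOTH = "English,Spanish"
--
-- def pack_languages(selected):
--     has_en = LANG_EN in selected
--     has_es = LANG_ES in selected
--     if has_en and has_es:
--         return LANG_BOTH
--     if has_en:
--         return LANG_EN
--     return LANG_ES
-- ===== Notes on version B (the rewrite author's own statement) =====
-- stated objective: simpler
-- what changed: Replaces A's filter/set-dedup/sort-by-key pipeline and length dispatch with two direct membership tests and a three-way branch (neither-selected collapses into the Spanish default).
import Mathlib
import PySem

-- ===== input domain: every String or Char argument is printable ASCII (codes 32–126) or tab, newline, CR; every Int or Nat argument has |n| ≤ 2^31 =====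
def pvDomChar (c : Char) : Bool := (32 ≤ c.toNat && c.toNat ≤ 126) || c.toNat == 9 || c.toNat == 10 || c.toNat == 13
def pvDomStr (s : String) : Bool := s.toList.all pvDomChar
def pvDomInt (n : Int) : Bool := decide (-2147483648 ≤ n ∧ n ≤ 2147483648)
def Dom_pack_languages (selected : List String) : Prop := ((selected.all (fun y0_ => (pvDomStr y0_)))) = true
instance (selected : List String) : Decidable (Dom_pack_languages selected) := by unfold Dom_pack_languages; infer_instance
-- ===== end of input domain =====

-- B replaces A's filter/set/sort pipeline with two membership tests and a three-way branch (simpler decomposition).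

-- ===== PORT A =====
-- s = [x for x in selected if x in (LANG_EN, LANG_ES)]; s = sorted(set(s), key=...); dispatch on len(s).
-- (sorted over the set is order-safe here: the key 0/1 is injective on the at-most-two distinct elements.)
def pack_languages (selected : List String) : String :=
  let s1 := selected.filter (fun x => x == "English" || x == "Spanish")
  let s2 := PySem.List.sorted (PySem.Set.ofList s1)
              (fun z => if z == "English" then (0 : Int) else 1) false
  if s2.length = 2 then "English,Spanish"
  else if s2.length = 1 then PySem.List.pyGetD s2 0 ""
  else "Spanish"

-- ===== PORT B =====
def pack_languages_alt (selected : List String) : String :=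
  let has_en := selected.contains "English"
  let has_es := selected.contains "Spanish"
  if has_en && has_es then "English,Spanish"
  else if has_en then "English"
  else "Spanish"

-- ===== PRECONDITION & SPEC =====
def Spec_pack_languages (selected : List String) (out : String) : Prop := out = pack_languages_alt selected
instance (selected : List String) (out : String) : Decidable (Spec_pack_languages selected out) := by unfold Spec_pack_languages; infer_instance

-- ===== CLAIM (what is proved, stated in full; the proofs are below) =====
def Claim_equal_pack_languages : Prop := ∀ (selected : List String), Dom_pack_languages selected → Spec_pack_languages selected (pack_languages selected)

-- ===== LEMMAS AND PROOFS =====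

-- A nodup list over the two-element alphabet {English, Spanish} is one of five literal lists.
lemma pv_small_cases (l : List String) (hn : l.Nodup)
    (hs : ∀ x ∈ l, x = "English" ∨ x = "Spanish") :
    l = [] ∨ l = ["English"] ∨ l = ["Spanish"] ∨
    l = ["English", "Spanish"] ∨ l = ["Spanish", "English"] := by
  match l with
  | [] => exact Or.inl rfl
  | [a] =>
    rcases hs a (by simp) with h | h <;> simp [h]
  | [a, b] =>
    have hab : a ≠ b := by simp at hn; exact hn
    rcases hs a (by simp) with ha | ha <;> rcases hs b (by simp) with hb | hb <;>
      simp [ha, hb] at hab ⊢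
  | a :: b :: c :: t =>
    exfalso
    have hab : a ≠ b := by simp at hn; tauto
    have hac : a ≠ c := by simp at hn; tauto
    have hbc : b ≠ c := by simp at hn; tauto
    rcases hs a (by simp) with ha | ha <;> rcases hs b (by simp) with hb | hb <;>
      rcases hs c (by simp) with hc | hc <;> simp_all

-- ===== VERDICT (by name: the statement is the Claim_ definition above) =====
theorem pack_languages_spec : Claim_equal_pack_languages := by
  intro selected _
  unfold Spec_pack_languages pack_languages pack_languages_alt
  have hEn : "English" ∈
      PySem.Set.ofList (selected.filter (fun x => x == "English" || x == "Spanish")) ↔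
      "English" ∈ selected := by
    rw [PySem.Set.mem_ofList, List.mem_filter]; simp
  have hEs : "Spanish" ∈
      PySem.Set.ofList (selected.filter (fun x => x == "English" || x == "Spanish")) ↔
      "Spanish" ∈ selected := by
    rw [PySem.Set.mem_ofList, List.mem_filter]; simp
  have hcases := pv_small_cases
    (PySem.Set.ofList (selected.filter (fun x => x == "English" || x == "Spanish")))
    (PySem.Set.nodup_ofList _)
    (by intro x hx
        rw [PySem.Set.mem_ofList, List.mem_filter] at hx
        have := hx.2; simp at this
        rcases this with h | h <;> [exact Or.inl h; exact Or.inr h])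
  rcases hcases with h | h | h | h | h <;>
    rw [h] at hEn hEs <;> simp at hEn hEs <;>
    simp [h, List.contains_eq_mem, hEn, hEs, PySem.List.sorted, PySem.List.insertBy,
      PySem.List.pyGetD, PySem.List.pyGet?, PySem.List.pyIdx?]
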